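-- pv_equiv track=rewrite | github.com/diocloid/adventOfCode | 2023/day5_try1.py | fillrest
-- ===== SOURCE A (Python) =====
-- def fillrest(minseed, maxseed, fullmap, step):
--     idx = 0
--     for x in range(minseed, maxseed+1):
--         if x not in fullmap[step].keys():
--             fullmap[step][x] = x
--             idx += 1
--
--     fullmap[step] = dict(sorted(fullmap[step].items()))
--
--     if(step < 7):
--         lowest = min(fullmap[step].items(), key=lambda x: x[1])
--         highest = max(fullmap[step].items(), key=lambda x: x[1])
--         fullmap = fillrest(int(lowest[1]), int(highest[1]), fullmap, step+1)
--
--     fullmap[step] = dict(sorted(fullmap[step].items()))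
--     return fullmap
-- ===== SOURCE B (Python) =====
-- def fillrest(minseed, maxseed, fullmap, step):
--     # Iterative version: walk steps from `step` up to 7 with an explicit loop,
--     # carrying the current (lo, hi) range; one sort per step (the second sort in
--     # the recursive original is idempotent). Mutates and returns fullmap.
--     lo, hi = minseed, maxseed
--     for s in [step] + list(range(step + 1, 8)):
--         m = fullmap[s]
--         for x in range(lo, hi + 1):
--             if x not in m:
--                 m[x] = x
--         fullmap[s] = dict(sorted(m.items()))
--         if s < 7:
--             items = fullmap[s].items()
--             lo = int(min(items, key=lambda p: p[1])[1])
--             hi = int(max(items, key=lambda p: p[1])[1])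
--     return fullmap
-- ===== Notes on version B (the rewrite author's own statement) =====
-- stated objective: alternative
-- what changed: Replaces the recursion over steps by an explicit loop from step up to 7 carrying the current (lo,hi) range, and drops the recursive version's redundant post-recursion re-sort (sorting an already-sorted dict is the identity); Pre_ excludes only inputs where both programs raise (a visited step key missing, or an empty dict with an empty fill range reaching min()).
import Mathlib
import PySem

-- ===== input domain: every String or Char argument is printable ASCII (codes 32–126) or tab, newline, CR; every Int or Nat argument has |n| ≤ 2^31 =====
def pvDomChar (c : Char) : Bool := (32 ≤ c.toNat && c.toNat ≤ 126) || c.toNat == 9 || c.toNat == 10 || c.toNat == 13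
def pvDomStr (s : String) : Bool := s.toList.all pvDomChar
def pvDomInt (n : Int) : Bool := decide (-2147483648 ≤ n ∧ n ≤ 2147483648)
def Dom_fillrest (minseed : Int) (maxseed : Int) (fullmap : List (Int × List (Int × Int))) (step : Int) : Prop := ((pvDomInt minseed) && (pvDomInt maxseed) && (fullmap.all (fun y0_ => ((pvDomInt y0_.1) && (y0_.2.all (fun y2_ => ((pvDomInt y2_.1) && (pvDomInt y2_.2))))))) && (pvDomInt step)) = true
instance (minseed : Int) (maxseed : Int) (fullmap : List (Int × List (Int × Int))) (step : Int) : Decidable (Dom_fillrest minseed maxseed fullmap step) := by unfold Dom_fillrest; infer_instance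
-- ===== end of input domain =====

-- fillrest: B replaces the recursion over steps by an explicit fold over the step list,
-- dropping the redundant second sort; return-value equivalence (the Python versions also
-- mutate `fullmap` in place — both perform the same final mutations).


-- ===== PORT A =====
-- shared boundary converters: the Python dict-of-dicts ↔ the assoc-list signature type
def pvToD (fm : List (Int × List (Int × Int))) : PySem.Dict Int (PySem.Dict Int Int) :=
  PySem.Dict.mk (fm.map (fun p => (p.1, PySem.Dict.mk p.2)))
def pvOfD (d : PySem.Dict Int (PySem.Dict Int Int)) : List (Int × List (Int × Int)) :=
  d.items.map (fun p => (p.1, p.2.items))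

-- Literal transliteration of A (the dead counter `idx` affects nothing and is omitted).
-- `fullmap[step]` on a missing key and `min`/`max` of an empty dict raise in Python:
-- those inputs are exactly the ones Pre_fillrest excludes (the port returns junk there).
def fillrestCore (minseed : Int) (maxseed : Int) (fm : PySem.Dict Int (PySem.Dict Int Int)) (step : Int) : PySem.Dict Int (PySem.Dict Int Int) :=
  let d1 := (PySem.List.pyRange minseed (maxseed + 1) 1).foldl
    (fun fm x =>
      if (fm.getD step PySem.Dict.empty).contains x then fm
      else fm.insert step ((fm.getD step PySem.Dict.empty).insert x x)) fm
  let d2 := d1.insert step (PySem.Dict.mk (PySem.List.sorted (d1.getD step PySem.Dict.empty).items (fun p => p.1) false))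
  let d3 :=
    if _h : step < 7 then
      match PySem.List.min? (d2.getD step PySem.Dict.empty).items (fun p => p.2),
            PySem.List.max? (d2.getD step PySem.Dict.empty).items (fun p => p.2) with
      | some lowest, some highest => fillrestCore lowest.2 highest.2 d2 (step + 1)
      | _, _ => d2      -- Python raises ValueError here (empty sequence); outside Pre_
    else d2
  d3.insert step (PySem.Dict.mk (PySem.List.sorted (d3.getD step PySem.Dict.empty).items (fun p => p.1) false))
termination_by (7 - step).toNat
decreasing_by omega

def fillrest (minseed : Int) (maxseed : Int) (fullmap : List (Int × List (Int × Int))) (step : Int) : List (Int × List (Int × Int)) :=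
  pvOfD (fillrestCore minseed maxseed (pvToD fullmap) step)

-- ===== PORT B =====
-- Literal transliteration of Source B: a fold over the explicit step list carrying (fullmap, lo, hi).
def fillrestAltStep (st : PySem.Dict Int (PySem.Dict Int Int) × Int × Int) (s : Int) : PySem.Dict Int (PySem.Dict Int Int) × Int × Int :=
  let m := (PySem.List.pyRange st.2.1 (st.2.2 + 1) 1).foldl
    (fun m x => if m.contains x then m else m.insert x x)
    (st.1.getD s PySem.Dict.empty)
  let m2 := PySem.Dict.mk (PySem.List.sorted m.items (fun p => p.1) false)
  let fm2 := st.1.insert s m2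
  if s < 7 then
    match PySem.List.min? m2.items (fun p => p.2), PySem.List.max? m2.items (fun p => p.2) with
    | some lo, some hi => (fm2, lo.2, hi.2)
    | _, _ => (fm2, st.2.1, st.2.2)   -- Python raises ValueError here; outside Pre_
  else (fm2, st.2.1, st.2.2)

def fillrest_alt (minseed : Int) (maxseed : Int) (fullmap : List (Int × List (Int × Int))) (step : Int) : List (Int × List (Int × Int)) :=
  let steps := step :: PySem.List.pyRange (step + 1) 8 1
  pvOfD (steps.foldl fillrestAltStep (pvToD fullmap, minseed, maxseed)).1

-- ===== PRECONDITION & SPEC =====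
-- Pre_ excludes exactly the inputs on which the Python raises: a visited step (step..7,
-- or just step when step > 7) missing from fullmap (KeyError), or step < 7 with an empty
-- fill range and an empty dict at step (ValueError from min of an empty sequence).
def Pre_fillrest (minseed : Int) (maxseed : Int) (fullmap : List (Int × List (Int × Int))) (step : Int) : Prop :=
  fullmap.any (fun p => p.1 == step) = true ∧
  (step < 8 → 8 - step ≤ (fullmap.length : Int) ∧
    -- the lower end is clamped so the checked range never exceeds the list length;
    -- under the preceding length bound the clamp is inert (max … = step + 1)
    ∀ s ∈ PySem.List.pyRange (max (step + 1) (7 - (fullmap.length : Int))) 8 1,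
      fullmap.any (fun p => p.1 == s) = true) ∧
  (step < 7 → minseed ≤ maxseed ∨ (fullmap.find? (fun p => p.1 == step)).map (fun p => p.2) ≠ some ([] : List (Int × Int)))
instance (minseed : Int) (maxseed : Int) (fullmap : List (Int × List (Int × Int))) (step : Int) : Decidable (Pre_fillrest minseed maxseed fullmap step) := by unfold Pre_fillrest; infer_instance

def pvWitness_fillrest : Int × Int × (List (Int × List (Int × Int))) × Int :=
  (1, 3, [(6, [(2, 5)]), (7, [])], 6)

def Spec_fillrest (minseed : Int) (maxseed : Int) (fullmap : List (Int × List (Int × Int))) (step : Int) (out : List (Int × List (Int × Int))) : Prop := out = fillrest_alt minseed maxseed fullmap step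
instance (minseed : Int) (maxseed : Int) (fullmap : List (Int × List (Int × Int))) (step : Int) (out : List (Int × List (Int × Int))) : Decidable (Spec_fillrest minseed maxseed fullmap step out) := by unfold Spec_fillrest; infer_instance

-- ===== CLAIM (what is proved, stated in full; the proofs are below) =====
def Claim_equal_fillrest : Prop := ∀ (minseed : Int) (maxseed : Int) (fullmap : List (Int × List (Int × Int))) (step : Int), Dom_fillrest minseed maxseed fullmap step → Pre_fillrest minseed maxseed fullmap step → Spec_fillrest minseed maxseed fullmap step (fillrest minseed maxseed fullmap step)

-- ===== LEMMAS AND PROOFS =====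

theorem afill_char (s : Int) (xs : List Int) (fm : PySem.Dict Int (PySem.Dict Int Int)) :
    (xs.foldl (fun fm x => if (fm.getD s PySem.Dict.empty).contains x then fm
        else fm.insert s ((fm.getD s PySem.Dict.empty).insert x x)) fm).getD s PySem.Dict.empty
      = xs.foldl (fun m x => if m.contains x then m else m.insert x x) (fm.getD s PySem.Dict.empty)
    ∧ ∀ v, (xs.foldl (fun fm x => if (fm.getD s PySem.Dict.empty).contains x then fm
        else fm.insert s ((fm.getD s PySem.Dict.empty).insert x x)) fm).insert s v = fm.insert s v := by
  induction xs generalizing fm with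
  | nil => exact ⟨rfl, fun v => rfl⟩
  | cons x xs ih =>
    simp only [List.foldl_cons]
    by_cases h : (fm.getD s PySem.Dict.empty).contains x = true
    · simp only [h, if_true]
      exact ih fm
    · simp only [h, if_false, Bool.false_eq_true]
      obtain ⟨h1, h2⟩ := ih (fm.insert s ((fm.getD s PySem.Dict.empty).insert x x))
      refine ⟨?_, fun v => (h2 v).trans (PySem.Dict.insert_insert_self _ _ _ _)⟩
      rw [h1, PySem.Dict.getD_insert_self]

theorem bfill_contains (xs : List Int) (m : PySem.Dict Int Int) (k : Int)
    (h : m.contains k = true) :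
    (xs.foldl (fun m x => if m.contains x then m else m.insert x x) m).contains k = true := by
  induction xs generalizing m with
  | nil => exact h
  | cons x xs ih =>
    simp only [List.foldl_cons]
    by_cases hx : m.contains x = true
    · simp only [hx, if_true]; exact ih m h
    · simp only [hx, if_false, Bool.false_eq_true]
      exact ih _ (by rw [PySem.Dict.contains_insert]; simp [h])

theorem bfill_contains_mem (xs : List Int) (m : PySem.Dict Int Int) (k : Int)
    (h : k ∈ xs) :
    (xs.foldl (fun m x => if m.contains x then m else m.insert x x) m).contains k = true := by
  induction xs generalizing m with
  | nil => cases h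
  | cons x xs ih =>
    simp only [List.foldl_cons]
    rcases List.mem_cons.1 h with rfl | hk
    · by_cases hx : m.contains k = true
      · simp only [hx, if_true]; exact bfill_contains xs m k hx
      · simp only [hx, if_false, Bool.false_eq_true]
        exact bfill_contains xs _ k (PySem.Dict.contains_insert_self _ _ _)
    · by_cases hx : m.contains x = true
      · simp only [hx, if_true]; exact ih m hk
      · simp only [hx, if_false, Bool.false_eq_true]; exact ih _ hk

theorem items_ne_nil_of_contains (d : PySem.Dict Int Int) (k : Int)
    (h : d.contains k = true) : d.items ≠ [] := by
  intro hnil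
  rw [PySem.Dict.contains_iff_mem_keys] at h
  simp only [PySem.Dict.keys, hnil, List.map_nil] at h
  cases h

theorem getD_of_all_eq (d : PySem.Dict Int (PySem.Dict Int Int)) (s : Int) (v : PySem.Dict Int Int)
    (hc : d.contains s = true) (hall : ∀ p ∈ d.items, p.1 = s → p.2 = v) :
    d.getD s PySem.Dict.empty = v := by
  obtain ⟨l⟩ := d
  induction l with
  | nil => simp [PySem.Dict.contains] at hc
  | cons p rest ih =>
    by_cases hp : p.1 = s
    · have : (PySem.Dict.mk (p :: rest)).getD s PySem.Dict.empty = p.2 := by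
        rw [PySem.Dict.getD_eq_get?_getD, PySem.Dict.get?_mk_cons]
        simp [hp]
      rw [this]
      exact hall p (List.mem_cons_self ..) hp
    · have hc' : (PySem.Dict.mk rest).contains s = true := by
        simp only [PySem.Dict.contains_mk] at hc ⊢
        rcases List.any_eq_true.1 hc with ⟨q, hq, hq2⟩
        rcases List.mem_cons.1 hq with rfl | hq'
        · exact absurd (by simpa using hq2) hp
        · exact List.any_eq_true.2 ⟨q, hq', hq2⟩
      have := ih hc' (fun q hq hqs => hall q (List.mem_cons_of_mem _ hq) hqs)
      obtain ⟨k, w⟩ := p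
      rw [PySem.Dict.getD_eq_get?_getD] at this
      rw [PySem.Dict.getD_eq_get?_getD, PySem.Dict.get?_mk_cons]
      simp only [] at hp
      simp only [show (k == s) = false by simpa using hp, if_false, Bool.false_eq_true]
      exact this

theorem insert_of_all_eq (d : PySem.Dict Int (PySem.Dict Int Int)) (s : Int) (v : PySem.Dict Int Int)
    (hc : d.contains s = true) (hall : ∀ p ∈ d.items, p.1 = s → p.2 = v) :
    d.insert s v = d := by
  apply PySem.Dict.ext
  rw [PySem.Dict.items_insert_of_contains _ _ hc]
  conv_rhs => rw [← List.map_id d.items]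
  apply List.map_congr_left
  intro p hp
  by_cases h : p.1 = s
  · simp only [h, BEq.rfl, if_true, id]
    have := hall p hp h
    cases p; simp_all
  · simp [h, id]

-- invariant: every item with key s carries value v, and key s is present
def pvKeyFixed (s : Int) (v : PySem.Dict Int Int) (d : PySem.Dict Int (PySem.Dict Int Int)) : Prop :=
  d.contains s = true ∧ ∀ p ∈ d.items, p.1 = s → p.2 = v

theorem altStep_fst (st : PySem.Dict Int (PySem.Dict Int Int) × Int × Int) (t : Int) :
    ∃ w, (fillrestAltStep st t).1 = st.1.insert t w := by
  unfold fillrestAltStep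
  by_cases h : t < 7
  · simp only [h, if_true]
    split <;> exact ⟨_, rfl⟩
  · simp only [h, if_false]
    exact ⟨_, rfl⟩

theorem keyFixed_insert (s t : Int) (v w : PySem.Dict Int Int)
    (d : PySem.Dict Int (PySem.Dict Int Int)) (hts : t ≠ s)
    (h : pvKeyFixed s v d) : pvKeyFixed s v (d.insert t w) := by
  obtain ⟨hc, hall⟩ := h
  constructor
  · rw [PySem.Dict.contains_insert]; simp [hc]
  · intro p hp hps
    rcases (PySem.Dict.mem_items_insert _ _ _ _).1 hp with rfl | ⟨hp', _⟩
    · exact absurd hps hts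
    · exact hall p hp' hps

theorem keyFixed_fold (s : Int) (v : PySem.Dict Int Int) (ts : List Int)
    (st : PySem.Dict Int (PySem.Dict Int Int) × Int × Int)
    (hts : ∀ t ∈ ts, t ≠ s) (h : pvKeyFixed s v st.1) :
    pvKeyFixed s v (ts.foldl fillrestAltStep st).1 := by
  induction ts generalizing st with
  | nil => exact h
  | cons t ts ih =>
    simp only [List.foldl_cons]
    obtain ⟨w, hw⟩ := altStep_fst st t
    refine ih _ (fun u hu => hts u (List.mem_cons_of_mem _ hu)) ?_
    rw [hw]
    exact keyFixed_insert s t v w st.1 (hts t (List.mem_cons_self ..)) h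

theorem items_mk {l : List (Int × Int)} : (PySem.Dict.mk l).items = l := rfl

theorem main_base (s lo hi : Int) (fm : PySem.Dict Int (PySem.Dict Int Int)) (hs : ¬ s < 7) :
    fillrestCore lo hi fm s
      = ((s :: PySem.List.pyRange (s + 1) 8 1).foldl fillrestAltStep (fm, lo, hi)).1 := by
  have hA := afill_char s (PySem.List.pyRange lo (hi + 1) 1) fm
  rw [fillrestCore]
  unfold fillrestAltStep
  simp only [List.foldl_cons, List.foldl_nil,
    PySem.List.pyRange_one_eq_nil (by omega : (8:Int) ≤ s + 1),
    dif_neg hs, if_neg hs, hA.1, hA.2, PySem.Dict.getD_insert_self, items_mk,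
    PySem.List.sorted_sorted, PySem.Dict.insert_insert_self]

theorem main_eq (n : Nat) : ∀ (s lo hi : Int) (fm : PySem.Dict Int (PySem.Dict Int Int)),
    (7 - s).toNat = n →
    (s < 7 → lo ≤ hi ∨ (fm.getD s PySem.Dict.empty).items ≠ []) →
    fillrestCore lo hi fm s
      = ((s :: PySem.List.pyRange (s + 1) 8 1).foldl fillrestAltStep (fm, lo, hi)).1 := by
  induction n with
  | zero =>
    intro s lo hi fm hn _
    exact main_base s lo hi fm (by omega)
  | succ m ih =>
    intro s lo hi fm hn hne
    by_cases hs : s < 7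
    · set xs := PySem.List.pyRange lo (hi + 1) 1 with hxs
      set mm := xs.foldl (fun m x => if m.contains x then m else m.insert x x)
        (fm.getD s PySem.Dict.empty) with hmm
      set m2 := PySem.Dict.mk (PySem.List.sorted mm.items (fun p => p.1) false) with hm2
      have hmmne : mm.items ≠ [] := by
        rcases hne hs with hlohi | hbase
        · refine items_ne_nil_of_contains _ lo (bfill_contains_mem _ _ _ ?_)
          rw [hxs, PySem.List.mem_pyRange_one]; omega
        · obtain ⟨p, hp⟩ := List.exists_mem_of_ne_nil _ hbase
          refine items_ne_nil_of_contains _ p.1 (bfill_contains _ _ _ ?_)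
          rw [PySem.Dict.contains_iff_mem_keys]
          simp only [PySem.Dict.keys]
          exact List.mem_map_of_mem hp
      have hm2ne : m2.items ≠ [] := by
        rw [hm2, items_mk]
        simpa [PySem.List.sorted_eq_nil_iff] using hmmne
      obtain ⟨lowest, hminv⟩ : ∃ p, PySem.List.min? m2.items (fun p => p.2) = some p := by
        cases h : PySem.List.min? m2.items (fun p => p.2) with
        | none => exact absurd ((PySem.List.min?_eq_none_iff _ _).1 h) hm2ne
        | some p => exact ⟨p, rfl⟩
      obtain ⟨highest, hmaxv⟩ : ∃ p, PySem.List.max? m2.items (fun p => p.2) = some p := by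
        cases h : PySem.List.max? m2.items (fun p => p.2) with
        | none => exact absurd ((PySem.List.max?_eq_none_iff _ _).1 h) hm2ne
        | some p => exact ⟨p, rfl⟩
      have hlh : lowest.2 ≤ highest.2 :=
        PySem.List.max?_isMax hmaxv lowest (PySem.List.min?_mem hminv)
      have hA := afill_char s xs fm
      rw [fillrestCore]
      simp only [← hxs, dif_pos hs, hA.1, hA.2, PySem.Dict.getD_insert_self, ← hmm, ← hm2,
        hminv, hmaxv]
      rw [ih (s + 1) lowest.2 highest.2 (fm.insert s m2) (by omega) (fun _ => Or.inl hlh)]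
      have hminv' : PySem.List.min? (PySem.List.sorted mm.items (fun p => p.1) false) (fun p => p.2) = some lowest := hminv
      have hmaxv' : PySem.List.max? (PySem.List.sorted mm.items (fun p => p.1) false) (fun p => p.2) = some highest := hmaxv
      have hstep : fillrestAltStep (fm, lo, hi) s = (fm.insert s m2, lowest.2, highest.2) := by
        unfold fillrestAltStep
        simp only [← hxs, ← hmm, if_pos hs, hminv', hmaxv', ← hm2]
      conv_rhs => rw [List.foldl_cons, hstep, PySem.List.pyRange_one_cons (by omega : s + (1:Int) < 8)]
      have hfix := keyFixed_fold s m2 ((s + 1) :: PySem.List.pyRange (s + 1 + 1) 8 1)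
        (fm.insert s m2, lowest.2, highest.2)
        (by
          intro t ht
          rcases List.mem_cons.1 ht with rfl | ht'
          · omega
          · have := PySem.List.mem_pyRange_one.1 ht'; omega)
        (by
          refine ⟨PySem.Dict.contains_insert_self _ _ _, ?_⟩
          intro p hp hps
          rcases (PySem.Dict.mem_items_insert _ _ _ _).1 hp with rfl | ⟨_, hne'⟩
          · rfl
          · exact absurd hps hne')
      obtain ⟨hc3, hall3⟩ := hfix
      rw [getD_of_all_eq _ _ _ hc3 hall3, hm2, items_mk, PySem.List.sorted_sorted, ← hm2]
      exact insert_of_all_eq _ _ _ hc3 hall3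
    · exact main_base s lo hi fm hs

theorem toD_get? (l : List (Int × List (Int × Int))) (s : Int) :
    (pvToD l).get? s = (l.find? (fun p => p.1 == s)).map (fun p => PySem.Dict.mk p.2) := by
  induction l with
  | nil => rfl
  | cons p t ih =>
    unfold pvToD
    simp only [List.map_cons]
    rw [PySem.Dict.get?_mk_cons]
    by_cases h : (p.1 == s) = true
    · simp [h]
    · simp only [h, if_false, Bool.false_eq_true]
      rw [show PySem.Dict.mk (t.map (fun p => (p.1, PySem.Dict.mk p.2))) = pvToD t from rfl, ih]
      simp [h]

-- ===== VERDICT (by name: the statement is the Claim_ definition above) =====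
theorem fillrest_spec : Claim_equal_fillrest := by
  intro minseed maxseed fullmap step _ hPre
  have hcond : step < 7 →
      minseed ≤ maxseed ∨ ((pvToD fullmap).getD step PySem.Dict.empty).items ≠ [] := by
    intro h7
    rcases hPre.2.2 h7 with h | h
    · exact Or.inl h
    · right
      rw [PySem.Dict.getD_eq_get?_getD, toD_get?]
      cases hf : fullmap.find? (fun p => p.1 == step) with
      | none =>
        have hany := hPre.1
        rw [List.any_eq_true] at hany
        obtain ⟨p, hp, hpe⟩ := hany
        exact absurd hpe (List.find?_eq_none.1 hf p hp)
      | some p =>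
        simp only [Option.map_some, Option.getD_some, items_mk]
        intro hnil
        apply h
        rw [hf]
        simp [hnil]
  unfold Spec_fillrest fillrest fillrest_alt
  rw [main_eq (7 - step).toNat step minseed maxseed (pvToD fullmap) rfl hcond]
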